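-- pv_equiv track=rewrite | github.com/ChaBoxxHF/Licence-Informatique | Licence_1/tp I23/tp corrections.py | phoque
-- ===== SOURCE A (Python) =====
-- def phoque(n):
--     if n == 0:
--         return []
--     elif n == 1:
--         return ['.']
--     elif n == 2:
--         return ['..','-']
--     else:
--         return [ '.' + x for x in phoque(n-1)] + [ '-' + x for x in phoque(n-2)]
-- ===== SOURCE B (Python) =====
-- def phoque(n):
--     if n <= 0:
--         return []
--     if n == 1:
--         return ['.']
--     a, b = ['.'], ['..', '-']
--     for _ in range(n - 2):
--         a, b = b, ['.' + x for x in b] + ['-' + x for x in a]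
--     return b
-- ===== Notes on version B (the rewrite author's own statement) =====
-- stated objective: alternative
-- what changed: Replaced A's doubly-recursive call tree by a bottom-up loop that keeps only the previous two lists and prefixes each once per step (same output, no repeated subcalls).
import Mathlib
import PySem

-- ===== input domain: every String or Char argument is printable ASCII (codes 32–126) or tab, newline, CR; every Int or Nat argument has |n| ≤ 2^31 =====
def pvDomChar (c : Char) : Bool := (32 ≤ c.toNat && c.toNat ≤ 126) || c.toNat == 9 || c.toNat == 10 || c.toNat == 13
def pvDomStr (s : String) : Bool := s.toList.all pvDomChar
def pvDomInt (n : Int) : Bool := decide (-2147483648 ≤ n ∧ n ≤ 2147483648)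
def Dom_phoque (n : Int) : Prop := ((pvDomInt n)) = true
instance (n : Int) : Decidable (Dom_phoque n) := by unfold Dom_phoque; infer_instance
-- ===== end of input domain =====

-- B replaces A's doubly-recursive call tree by a bottom-up two-list loop over the previous two results.

-- ===== PORT A =====
-- A's recursion on n, expressed as structural recursion on the natural number n.toNat
-- (Pre_ restricts to non-negative n, where this coincides with A's Int recursion).
def phoqueA : Nat → List String
  | 0 => []
  | 1 => ["."]
  | 2 => ["..", "-"]
  | (k+3) => (phoqueA (k+2)).map (fun x => "." ++ x) ++ (phoqueA (k+1)).map (fun x => "-" ++ x)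

def phoque (n : Int) : List String := phoqueA n.toNat

-- ===== PORT B =====
-- one loop step: (a, b) := (b, ['.'+x for x in b] + ['-'+x for x in a])
def phoqueB_step (s : List String × List String) : List String × List String :=
  (s.2, s.2.map (fun x => "." ++ x) ++ s.1.map (fun x => "-" ++ x))

def phoque_alt (n : Int) : List String :=
  if n ≤ 0 then []
  else if n = 1 then ["."]
  else ((List.range (n - 2).toNat).foldl (fun s _ => phoqueB_step s) (["."], ["..", "-"])).2

-- ===== PRECONDITION & SPEC =====
-- Pre_ excludes negative n, where Python A recurses without a base case (RecursionError).
def Pre_phoque (n : Int) : Prop := 0 ≤ n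
instance (n : Int) : Decidable (Pre_phoque n) := by unfold Pre_phoque; infer_instance
def pvWitness_phoque : Int := 5

def Spec_phoque (n : Int) (out : List String) : Prop := out = phoque_alt n
instance (n : Int) (out : List String) : Decidable (Spec_phoque n out) := by unfold Spec_phoque; infer_instance

-- ===== CLAIM (what is proved, stated in full; the proofs are below) =====
def Claim_equal_phoque : Prop := ∀ (n : Int), Dom_phoque n → Pre_phoque n → Spec_phoque n (phoque n)

-- ===== LEMMAS AND PROOFS =====

-- loop invariant: after k steps the pair holds (phoqueA (k+1), phoqueA (k+2))
theorem phoqueB_foldl (k : Nat) :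
    (List.range k).foldl (fun s _ => phoqueB_step s) (["."], ["..", "-"])
      = (phoqueA (k+1), phoqueA (k+2)) := by
  induction k with
  | zero => rfl
  | succ k ih =>
    rw [List.range_succ, List.foldl_append, ih]
    simp [phoqueB_step, phoqueA]

-- ===== VERDICT (by name: the statement is the Claim_ definition above) =====
theorem phoque_spec : Claim_equal_phoque := by
  intro n _ hpre
  unfold Spec_phoque phoque phoque_alt
  split_ifs with h0 h1
  · have : n = 0 := le_antisymm h0 hpre
    subst this; rfl
  · subst h1; rfl
  · have h2 : 2 ≤ n := by omega
    have hn : n.toNat = (n - 2).toNat + 2 := by omega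
    rw [phoqueB_foldl, hn]
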